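-- pv_equiv track=rewrite | github.com/yeseong31/coding-test | 프로그래머스/2/42626. 더 맵게/더 맵게.py | solution
-- ===== SOURCE A (Python) =====
-- from heapq import heapify, heappush, heappop
--
-- def solution(scoville, K):
--     answer = 0
--     heapify(scoville)
--
--     while scoville[0] < K:
--         if len(scoville) <= 1:
--             return -1
--
--         heappush(scoville, heappop(scoville) + heappop(scoville) * 2)
--         answer += 1
--
--     return answer
-- ===== SOURCE B (Python) =====
-- def solution(scoville, K):
--     # Sorted-list re-implementation (heap replaced by a maintained sorted list).
--     # Return-value equivalent to A; unlike A it does not mutate its argument.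
--     s = sorted(scoville)
--     answer = 0
--     while s[0] < K:
--         if len(s) <= 1:
--             return -1
--         a = s.pop(0)
--         b = s.pop(0)
--         x = a + b * 2
--         i = 0
--         while i < len(s) and s[i] < x:
--             i += 1
--         s.insert(i, x)
--         answer += 1
--     return answer
-- ===== Notes on version B (the rewrite author's own statement) =====
-- stated objective: alternative
-- what changed: Replaces the binary min-heap (heapify/heappush/heappop) by an explicitly maintained sorted list: sort once, take the two smallest from the front, and re-insert the mix by ordered linear insertion.
import Mathlib
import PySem

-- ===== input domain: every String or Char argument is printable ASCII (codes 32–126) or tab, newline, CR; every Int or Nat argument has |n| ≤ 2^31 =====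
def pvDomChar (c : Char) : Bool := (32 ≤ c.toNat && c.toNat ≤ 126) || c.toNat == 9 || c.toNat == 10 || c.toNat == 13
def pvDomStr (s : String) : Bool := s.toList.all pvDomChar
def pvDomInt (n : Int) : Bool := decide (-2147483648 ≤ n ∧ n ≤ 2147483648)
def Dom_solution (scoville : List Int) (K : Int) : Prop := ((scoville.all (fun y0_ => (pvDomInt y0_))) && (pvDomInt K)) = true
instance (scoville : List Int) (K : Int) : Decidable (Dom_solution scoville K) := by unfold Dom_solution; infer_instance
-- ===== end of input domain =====

-- B replaces A's binary min-heap by a maintained sorted list (sort once, pop the two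
-- smallest from the front, ordered linear re-insert); return-value equivalence only:
-- A heapifies its argument in place, B leaves it untouched.

-- ===== PORT A =====
-- A's heapq calls are ported at the library contract level: the heap is kept as the
-- multiset of its elements; heappop removes and returns the minimum (= scoville[0]
-- of a heap), heappush adds the element. Exact for the returned value.
def heapMin : List Int → Int
  | [] => 0
  | x :: xs => xs.foldl min x

-- the while-loop of A; fuel = initial length bounds the iterations (each one shrinks the heap)
def solutionLoop : Nat → List Int → Int → Int → Int
  | 0, _, _, answer => answer
  | fuel + 1, h, K, answer =>
    if heapMin h < K then
      if h.length ≤ 1 then -1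
      else
        let a := heapMin h
        let h1 := h.erase a
        let b := heapMin h1
        let h2 := h1.erase b
        solutionLoop fuel (h2 ++ [a + b * 2]) K (answer + 1)
    else answer

def solution (scoville : List Int) (K : Int) : Int :=
  solutionLoop scoville.length scoville K 0

-- ===== PORT B =====
-- the inner `while i < len(s) and s[i] < x: i += 1; s.insert(i, x)` of Source B
def sInsert (x : Int) : List Int → List Int
  | [] => [x]
  | y :: ys => if y < x then y :: sInsert x ys else x :: y :: ys

def altLoop : Nat → List Int → Int → Int → Int
  | 0, _, _, answer => answer
  | fuel + 1, s, K, answer =>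
    match s with
    | [] => answer
    | a :: rest =>
      if a < K then
        if (a :: rest).length ≤ 1 then -1
        else
          match rest with
          | [] => -1
          | b :: t => altLoop fuel (sInsert (a + b * 2) t) K (answer + 1)
      else answer

def solution_alt (scoville : List Int) (K : Int) : Int :=
  altLoop scoville.length (PySem.List.sorted scoville (fun x => x) false) K 0

-- ===== PRECONDITION & SPEC =====
-- Pre_ excludes the empty list, on which both A and B raise IndexError (scoville[0] / s[0]).
def Pre_solution (scoville : List Int) (K : Int) : Prop := scoville ≠ []
instance (scoville : List Int) (K : Int) : Decidable (Pre_solution scoville K) := by unfold Pre_solution; infer_instance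
def pvWitness_solution : List Int × Int := ([1, 2, 3, 9, 10, 12], 7)

def Spec_solution (scoville : List Int) (K : Int) (out : Int) : Prop := out = solution_alt scoville K
instance (scoville : List Int) (K : Int) (out : Int) : Decidable (Spec_solution scoville K out) := by unfold Spec_solution; infer_instance

-- ===== CLAIM (what is proved, stated in full; the proofs are below) =====
def Claim_equal_solution : Prop := ∀ (scoville : List Int) (K : Int), Dom_solution scoville K → Pre_solution scoville K → Spec_solution scoville K (solution scoville K)

-- ===== LEMMAS AND PROOFS =====

-- heapMin computes List.min? (on a nonempty list)
theorem heapMin_eq_min? (x : Int) (xs : List Int) : (x :: xs).min? = some (heapMin (x :: xs)) := by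
  simp [List.min?, heapMin]

-- the head of a sorted list is the minimum of any permutation of it
theorem heapMin_of_perm_sorted (h : List Int) (a : Int) (rest : List Int)
    (hp : h.Perm (a :: rest)) (hs : (a :: rest).Pairwise (fun p q : Int => p ≤ q)) :
    heapMin h = a := by
  cases h with
  | nil => exact absurd hp.symm (by simp)
  | cons y ys =>
    have h1 : (y :: ys).min? = some (heapMin (y :: ys)) := heapMin_eq_min? y ys
    rw [List.min?_eq_some_iff] at h1
    obtain ⟨hmem, hle⟩ := h1
    have hmem' : heapMin (y :: ys) ∈ a :: rest := hp.mem_iff.mp hmem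
    have hle' : ∀ b ∈ a :: rest, heapMin (y :: ys) ≤ b := fun b hb => hle b (hp.mem_iff.mpr hb)
    have ha1 : heapMin (y :: ys) ≤ a := hle' a (List.mem_cons_self ..)
    have ha2 : a ≤ heapMin (y :: ys) := by
      rcases List.mem_cons.mp hmem' with h | h
      · exact le_of_eq h.symm
      · exact List.rel_of_pairwise_cons hs h
    omega

-- sInsert is a sorted insertion: permutation and sortedness
theorem sInsert_perm (x : Int) (l : List Int) : (sInsert x l).Perm (x :: l) := by
  induction l with
  | nil => simp [sInsert]
  | cons y ys ih =>
    simp only [sInsert]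
    split
    · exact (ih.cons y).trans (List.Perm.swap x y ys)
    · exact List.Perm.refl _

theorem sInsert_sorted (x : Int) (l : List Int)
    (hs : l.Pairwise (fun p q : Int => p ≤ q)) :
    (sInsert x l).Pairwise (fun p q : Int => p ≤ q) := by
  induction l with
  | nil => simp [sInsert]
  | cons y ys ih =>
    simp only [sInsert]
    rcases List.pairwise_cons.mp hs with ⟨hy, hys⟩
    split
    · rename_i hlt
      refine List.pairwise_cons.mpr ⟨?_, ih hys⟩
      intro z hz
      have := (sInsert_perm x ys).mem_iff.mp hz
      rcases List.mem_cons.mp this with h | h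
      · omega
      · exact hy z h
    · rename_i hnlt
      refine List.pairwise_cons.mpr ⟨?_, hs⟩
      intro z hz
      rcases List.mem_cons.mp hz with h | h
      · omega
      · exact le_trans (by omega) (hy z h)

-- lockstep invariant: A's heap (as a multiset) stays a permutation of B's sorted list
theorem loop_eq (fuel : Nat) : ∀ (h s : List Int) (K answer : Int),
    h ≠ [] → h.Perm s → s.Pairwise (fun p q : Int => p ≤ q) →
    solutionLoop fuel h K answer = altLoop fuel s K answer := by
  induction fuel with
  | zero => intro h s K answer _ _ _; rfl
  | succ n ih =>
    intro h s K answer hne hp hs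
    cases s with
    | nil => exact absurd (List.Perm.eq_nil hp) hne
    | cons a rest =>
      have hmin : heapMin h = a := heapMin_of_perm_sorted h a rest hp hs
      have hlen : h.length = (a :: rest).length := hp.length_eq
      simp only [solutionLoop, altLoop, hmin]
      split
      · -- a < K
        cases rest with
        | nil =>
          have : h.length ≤ 1 := by simp at hlen; omega
          rw [if_pos this]; split <;> rfl
        | cons b t =>
          have hlen2 : ¬ h.length ≤ 1 := by simp at hlen; omega
          have h2le : ¬ (a :: b :: t).length ≤ 1 := by simp only [List.length_cons]; omega
          rw [if_neg hlen2, if_neg h2le]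
          -- first pop
          have hp1 : (h.erase a).Perm (b :: t) := by
            have := hp.erase a
            rwa [List.erase_cons_head] at this
          have hs1 : (b :: t).Pairwise (fun p q : Int => p ≤ q) := (List.pairwise_cons.mp hs).2
          have hmin1 : heapMin (h.erase a) = b := heapMin_of_perm_sorted _ b t hp1 hs1
          rw [hmin1]
          -- second pop
          have hp2 : ((h.erase a).erase b).Perm t := by
            have := hp1.erase (a := b)
            rwa [List.erase_cons_head] at this
          have hs2 : t.Pairwise (fun p q : Int => p ≤ q) := (List.pairwise_cons.mp hs1).2
          -- recurse
          exact ih (((h.erase a).erase b) ++ [a + b * 2]) (sInsert (a + b * 2) t) K (answer + 1)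
            (by simp)
            (((hp2.append (List.Perm.refl [a + b * 2])).trans
              (List.perm_append_singleton _ _)).trans (sInsert_perm _ _).symm)
            (sInsert_sorted _ _ hs2)
      · rfl

theorem sorted_self_pairwise (l : List Int) :
    (PySem.List.sorted l (fun x => x) false).Pairwise (fun p q : Int => p ≤ q) :=
  PySem.List.sorted_pairwise l (fun x => x)

-- ===== VERDICT (by name: the statement is the Claim_ definition above) =====
theorem solution_spec : Claim_equal_solution := by
  intro scoville K _ hpre
  unfold Spec_solution solution solution_alt
  have hperm : scoville.Perm (PySem.List.sorted scoville (fun x => x) false) :=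
    (PySem.List.sorted_perm scoville (fun x => x) false).symm
  exact loop_eq scoville.length scoville _ K 0 hpre hperm (sorted_self_pairwise scoville)
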